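-- pv_equiv track=rewrite | github.com/Nazar0360/chessstego | chessstego/fen.py | int_to_message
-- ===== SOURCE A (Python) =====
-- ALPHABET = "abcdefghijklmnopqrstuvwxyz " + "\\"
--
-- BASE_MESSAGE = len(ALPHABET)  # 28
--
-- def int_to_message(n, length):
--     """
--     Convert an integer n into a base–28 string of the given length.
--     Pads with leading 'a's if necessary.
--     """
--     digits = [0] * length
--     for i in range(length - 1, -1, -1):
--         digits[i] = n % BASE_MESSAGE
--         n //= BASE_MESSAGE
--     if n != 0:
--         raise ValueError("Integer too large to represent in the given length.")
--     return "".join(ALPHABET[d] for d in digits)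
-- ===== SOURCE B (Python) =====
-- ALPHABET = "abcdefghijklmnopqrstuvwxyz " + "\\"
--
-- BASE_MESSAGE = len(ALPHABET)  # 28
--
-- def int_to_message(n, length):
--     """
--     Convert an integer n into a base-28 string of the given length.
--     Pads with leading 'a's if necessary.
--     """
--     if n < 0:
--         raise ValueError("Integer too large to represent in the given length.")
--     digits = []
--     while n > 0:
--         digits.append(n % BASE_MESSAGE)
--         n //= BASE_MESSAGE
--     if len(digits) > length:
--         raise ValueError("Integer too large to represent in the given length.")
--     return "a" * (length - len(digits)) + "".join(ALPHABET[d] for d in reversed(digits))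
-- ===== Notes on version B (the rewrite author's own statement) =====
-- stated objective: faster
-- what changed: B extracts only the significant digits least-significant-first in a while-loop over n (instead of filling a preallocated length-sized array from the back), then left-pads with 'a' via string repetition, so the work is O(number of significant digits) rather than O(length).
-- outside the precondition, e.g. on int_to_message(0, -1): A returns '', B raises ValueError
import Mathlib
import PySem

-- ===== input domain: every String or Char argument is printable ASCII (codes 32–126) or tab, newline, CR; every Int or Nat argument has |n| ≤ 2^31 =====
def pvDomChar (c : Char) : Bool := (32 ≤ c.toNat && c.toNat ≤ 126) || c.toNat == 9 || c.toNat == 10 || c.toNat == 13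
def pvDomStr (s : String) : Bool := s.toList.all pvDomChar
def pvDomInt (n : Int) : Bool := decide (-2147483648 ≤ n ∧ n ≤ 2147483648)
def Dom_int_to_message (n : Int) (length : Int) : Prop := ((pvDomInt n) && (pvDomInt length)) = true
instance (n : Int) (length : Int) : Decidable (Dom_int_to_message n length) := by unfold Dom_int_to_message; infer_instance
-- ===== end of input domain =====

-- B replaces A's back-to-front fill of a preallocated length-sized array by a while-loop
-- extracting only the significant digits LSB-first, then left-pads with 'a'.

-- ===== PORT A =====
-- ALPHABET = "abcdefghijklmnopqrstuvwxyz " + "\\"  (28 chars)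
def pvALPHABET : List Char :=
  ['a','b','c','d','e','f','g','h','i','j','k','l','m','n',
   'o','p','q','r','s','t','u','v','w','x','y','z',' ','\\']

-- ALPHABET[d]; every use has 0 ≤ d < 28 so the default is never taken
def pvAch (d : Int) : Char := (PySem.List.pyGet? pvALPHABET d).getD 'a'

def int_to_message (n : Int) (length : Int) : String :=
  let digits : List Int := List.replicate length.toNat 0
  let st :=
    (PySem.List.pyRange (length - 1) (-1) (-1)).foldl
      (fun (st : List Int × Int) i =>
        (st.1.set i.toNat (PySem.Int.mod st.2 28), PySem.Int.floordiv st.2 28))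
      (digits, n)
  if st.2 ≠ 0 then ""  -- raise ValueError: excluded by Pre_
  else String.mk (st.1.map pvAch)  -- "".join(ALPHABET[d] for d in digits)

-- ===== PORT B =====
-- the while-loop 'while n > 0: digits.append(n % 28); n //= 28', with n itself as fuel
-- (the fuel only makes the recursion structural; it never changes the value: n // 28 < n for n > 0)
def pvDigitsF : Nat → Nat → List Int
  | 0, _ => []
  | fuel + 1, m => if m = 0 then [] else ((m % 28 : Nat) : Int) :: pvDigitsF fuel (m / 28)

def int_to_message_alt (n : Int) (length : Int) : String :=
  if n < 0 then ""  -- raise ValueError: excluded by Pre_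
  else
    let ds := pvDigitsF n.toNat n.toNat
    if (ds.length : Int) > length then ""  -- raise ValueError: excluded by Pre_
    else
      -- "a" * (length - len(digits)) + "".join(ALPHABET[d] for d in reversed(digits))
      String.mk (PySem.List.pyRepeat ['a'] (length - ds.length) ++ ds.reverse.map pvAch)

-- ===== PRECONDITION & SPEC =====
-- A raises ValueError unless the n left over after `length` divisions is 0, i.e. unless
-- 0 ≤ n < 28^length (negative n never reaches 0 under floor division).  Pre_ additionally
-- excludes length < 0 (where A returns "" only for n = 0, an accident of [0]*negative = []
-- and an empty loop, while B's natural length check raises there).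
def Pre_int_to_message (n : Int) (length : Int) : Prop :=
  0 ≤ n ∧ 0 ≤ length ∧ n < (28 : Int) ^ length.toNat
instance (n : Int) (length : Int) : Decidable (Pre_int_to_message n length) := by
  unfold Pre_int_to_message; infer_instance
def pvWitness_int_to_message : Int × Int := (755, 3)
def Spec_int_to_message (n : Int) (length : Int) (out : String) : Prop := out = int_to_message_alt n length
instance (n : Int) (length : Int) (out : String) : Decidable (Spec_int_to_message n length out) := by unfold Spec_int_to_message; infer_instance

-- ===== CLAIM (what is proved, stated in full; the proofs are below) =====
def Claim_equal_int_to_message : Prop := ∀ (n : Int) (length : Int), Dom_int_to_message n length → Pre_int_to_message n length → Spec_int_to_message n length (int_to_message n length)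

-- ===== LEMMAS AND PROOFS =====

-- A's loop, made explicit: setting the digits back-to-front …
def pvSetDig : Nat → Int → List Int → List Int
  | 0, _, ds => ds
  | L + 1, v, ds => pvSetDig L (PySem.Int.floordiv v 28) (ds.set L (PySem.Int.mod v 28))

-- … and the iterated floor division of the second accumulator
def pvIterDiv : Nat → Int → Int
  | 0, v => v
  | L + 1, v => pvIterDiv L (PySem.Int.floordiv v 28)

-- the digit list A produces, most significant first
def pvMsb : Nat → Int → List Int
  | 0, _ => []
  | L + 1, v => pvMsb L (PySem.Int.floordiv v 28) ++ [PySem.Int.mod v 28]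

theorem pvFoldA (L : Nat) (ds : List Int) (v : Int) :
    (PySem.List.pyRange ((L : Int) - 1) (-1) (-1)).foldl
      (fun (st : List Int × Int) i =>
        (st.1.set i.toNat (PySem.Int.mod st.2 28), PySem.Int.floordiv st.2 28))
      (ds, v) = (pvSetDig L v ds, pvIterDiv L v) := by
  induction L generalizing ds v with
  | zero =>
      rw [PySem.List.pyRange_neg_one_eq_nil (by norm_num)]
      simp [pvSetDig, pvIterDiv]
  | succ L ih =>
      have h1 : ((L + 1 : Nat) : Int) - 1 = (L : Int) := by push_cast; ring
      rw [h1, PySem.List.pyRange_neg_one_cons (by omega)]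
      have h2 : ((L : Int) - 1) = ((L : Int) - 1) := rfl
      simp only [List.foldl_cons, Int.toNat_natCast]
      rw [ih]
      rfl

theorem pvSetDig_eq_msb (L : Nat) (v : Int) (ds : List Int) (h : L ≤ ds.length) :
    pvSetDig L v ds = pvMsb L v ++ ds.drop L := by
  induction L generalizing v ds with
  | zero => simp [pvSetDig, pvMsb]
  | succ L ih =>
      have hL : L < ds.length := h
      rw [pvSetDig, ih _ _ (by simpa using Nat.le_of_lt hL)]
      have hdrop : (ds.set L (PySem.Int.mod v 28)).drop L
          = PySem.Int.mod v 28 :: ds.drop (L + 1) := by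
        rw [List.set_eq_take_cons_drop _ hL]
        have h1 : (ds.take L).length = L := by simp [Nat.le_of_lt hL]
        nth_rewrite 1 [← h1]
        rw [List.drop_left]
      rw [hdrop, pvMsb, List.append_assoc]
      rfl

theorem pvIterDiv_zero (L m : Nat) (h : m < 28 ^ L) : pvIterDiv L (m : Int) = 0 := by
  induction L generalizing m with
  | zero => interval_cases m; simp [pvIterDiv]
  | succ L ih =>
      rw [pvIterDiv]
      have : PySem.Int.floordiv (m : Int) 28 = ((m / 28 : Nat) : Int) := by
        exact_mod_cast PySem.Int.floordiv_natCast m 28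
      rw [this]
      exact ih _ (Nat.div_lt_of_lt_mul (by rw [pow_succ] at h; omega))

theorem pvMsb_length (L : Nat) (v : Int) : (pvMsb L v).length = L := by
  induction L generalizing v with
  | zero => simp [pvMsb]
  | succ L ih => rw [pvMsb]; simp [ih]

theorem pvMsb_pad (L : Nat) : ∀ (fuel m : Nat), m ≤ fuel → m < 28 ^ L →
    pvMsb L (m : Int) =
      List.replicate (L - (pvDigitsF fuel m).length) (0 : Int) ++ (pvDigitsF fuel m).reverse := by
  induction L with
  | zero =>
      intro fuel m _ h
      interval_cases m
      cases fuel <;> simp [pvMsb, pvDigitsF]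
  | succ L ih =>
      intro fuel m hf h
      have hmod : PySem.Int.mod (m : Int) 28 = ((m % 28 : Nat) : Int) := by
        exact_mod_cast PySem.Int.mod_natCast m 28
      have hdiv : PySem.Int.floordiv (m : Int) 28 = ((m / 28 : Nat) : Int) := by
        exact_mod_cast PySem.Int.floordiv_natCast m 28
      rw [pvMsb, hmod, hdiv]
      by_cases hm : m = 0
      · subst hm
        have hz : pvDigitsF fuel 0 = [] := by cases fuel <;> simp [pvDigitsF]
        rw [hz]
        simp only [Nat.zero_div, Nat.zero_mod, List.length_nil, Nat.sub_zero, List.reverse_nil,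
          List.append_nil]
        rw [ih fuel 0 (Nat.zero_le _) (by positivity), hz]
        simp [List.replicate_succ']
      · obtain ⟨fuel', rfl⟩ : ∃ f, fuel = f + 1 := ⟨fuel - 1, by omega⟩
        rw [pvDigitsF, if_neg hm]
        have hdle : m / 28 ≤ fuel' := by
          have := Nat.div_lt_self (Nat.pos_of_ne_zero hm) (by norm_num : 1 < 28)
          omega
        have hdlt : m / 28 < 28 ^ L := Nat.div_lt_of_lt_mul (by rw [pow_succ] at h; omega)
        rw [ih fuel' (m / 28) hdle hdlt]
        simp only [List.length_cons, List.reverse_cons, Nat.succ_sub_succ]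
        rw [List.append_assoc]

theorem pvDigitsF_len_le (L fuel m : Nat) (hf : m ≤ fuel) (h : m < 28 ^ L) :
    (pvDigitsF fuel m).length ≤ L := by
  have := congrArg List.length (pvMsb_pad L fuel m hf h)
  simp [pvMsb_length] at this
  omega

theorem pvAch_zero : pvAch 0 = 'a' := by decide

-- ===== VERDICT (by name: the statement is the Claim_ definition above) =====
theorem int_to_message_spec : Claim_equal_int_to_message := by
  intro n length _ hpre
  obtain ⟨hn, hl, hlt⟩ := hpre
  unfold Spec_int_to_message int_to_message int_to_message_alt
  obtain ⟨m, rfl⟩ : ∃ m : Nat, n = (m : Int) := ⟨n.toNat, (Int.toNat_of_nonneg hn).symm⟩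
  obtain ⟨L, rfl⟩ : ∃ L : Nat, length = (L : Int) := ⟨length.toNat, (Int.toNat_of_nonneg hl).symm⟩
  have hmlt : m < 28 ^ L := by
    rw [Int.toNat_natCast] at hlt
    exact_mod_cast hlt
  have hdle : (pvDigitsF m m).length ≤ L := pvDigitsF_len_le L m m le_rfl hmlt
  simp only [Int.toNat_natCast]
  rw [pvFoldA]
  rw [pvIterDiv_zero L m hmlt]
  rw [pvSetDig_eq_msb L (m : Int) _ (by simp)]
  rw [if_neg (by simp)]
  rw [if_neg (by exact not_lt.mpr (Int.natCast_nonneg m))]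
  rw [if_neg (by exact_mod_cast not_lt.mpr hdle)]
  have htn : ((L : Int) - ((pvDigitsF m m).length : Int)).toNat = L - (pvDigitsF m m).length := by
    omega
  simp only [List.drop_replicate, Nat.sub_self, List.replicate_zero, List.append_nil]
  rw [pvMsb_pad L m m le_rfl hmlt, PySem.List.pyRepeat_singleton, htn, List.map_append,
    List.map_replicate, pvAch_zero]
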